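-- pv_equiv track=rewrite | github.com/anthonytk31415/python-data-structures-and-algorithms | problems/lc-contest/20240817-1/q3.py | maxUpperRight
-- ===== SOURCE A (Python) =====
-- def maxUpperRight(grid):
--     dp = [[x for x in row] for row in grid]
--     for i in range(len(grid)):
--         for j in range(len(grid[0])-1, -1, -1):
--             if i == 0:
--                 if j == len(grid[0])-1: continue
--                 else: dp[i][j] = max(dp[i][j], dp[i][j+1])
--             else:
--                 if j == len(grid[0])-1:
--                     dp[i][j] = max(dp[i][j], dp[i-1][j])
--                 else:
--                     dp[i][j] = max(dp[i][j], dp[i-1][j], dp[i][j+1])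
--     return dp
-- ===== SOURCE B (Python) =====
-- def maxUpperRight(grid):
--     res = [list(row) for row in grid]
--     n = len(grid[0]) if grid else 0
--     # pass 1: suffix maxima within each row, right to left
--     for row in res:
--         for j in range(n - 2, -1, -1):
--             row[j] = max(row[j], row[j + 1])
--     # pass 2: running maxima down each column
--     for i in range(1, len(res)):
--         for j in range(n):
--             res[i][j] = max(res[i][j], res[i - 1][j])
--     return res
-- ===== Notes on version B (the rewrite author's own statement) =====
-- stated objective: alternative
-- what changed: Replaces the fused in-place DP (one right-to-left recurrence per cell reading row i-1 and column j+1 simultaneously, with i==0/j==last special cases) by two independent directional passes on a fresh copy: per-row suffix maxima, then running maxima down each column.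
import Mathlib
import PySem

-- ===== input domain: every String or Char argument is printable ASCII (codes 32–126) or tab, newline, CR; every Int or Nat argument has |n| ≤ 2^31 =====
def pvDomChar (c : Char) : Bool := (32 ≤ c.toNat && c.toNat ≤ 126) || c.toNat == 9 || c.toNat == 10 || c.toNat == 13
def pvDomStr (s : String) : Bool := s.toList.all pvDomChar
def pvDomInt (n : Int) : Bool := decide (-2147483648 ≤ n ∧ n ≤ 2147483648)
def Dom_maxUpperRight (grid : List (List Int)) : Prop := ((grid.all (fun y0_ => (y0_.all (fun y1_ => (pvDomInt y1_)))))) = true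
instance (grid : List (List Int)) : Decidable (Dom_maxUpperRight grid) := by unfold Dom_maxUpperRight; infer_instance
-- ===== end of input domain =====

-- B replaces A's fused in-place index DP by two independent directional passes (per-row suffix maxima, then a running column maximum) on fresh lists; A mutates only its private copy, so both are pure in effect.


-- ===== PORT A =====
-- dp[i][j] read / write, Python index semantics (indices are in range on Pre_ inputs)
def pvG (dp : List (List Int)) (i j : Int) : Int :=
  PySem.List.pyGetD (PySem.List.pyGetD dp i []) j 0

def pvS (dp : List (List Int)) (i j : Int) (v : Int) : List (List Int) :=
  PySem.List.pySetD dp i (PySem.List.pySetD (PySem.List.pyGetD dp i []) j v)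

def maxUpperRight (grid : List (List Int)) : List (List Int) :=
  (PySem.List.pyRange 0 (grid.length : Int) 1).foldl (fun dp i =>
    (PySem.List.pyRange (((PySem.List.pyGetD grid 0 []).length : Int) - 1) (-1) (-1)).foldl
      (fun dp j =>
        if i == 0 then
          if j == ((PySem.List.pyGetD grid 0 []).length : Int) - 1 then dp
          else pvS dp i j (max (pvG dp i j) (pvG dp i (j + 1)))
        else
          if j == ((PySem.List.pyGetD grid 0 []).length : Int) - 1 then
            pvS dp i j (max (pvG dp i j) (pvG dp (i - 1) j))
          else pvS dp i j (max (max (pvG dp i j) (pvG dp (i - 1) j)) (pvG dp i (j + 1))))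
      dp)
    (grid.map (fun row => row.map (fun x => x)))

-- ===== PORT B =====
def maxUpperRight_alt (grid : List (List Int)) : List (List Int) :=
  -- pass 2 (running column maxima) applied to pass 1 (per-row suffix maxima within the
  -- grid's width n = len(grid[0])), both transcribed from Source B's index loops
  (PySem.List.pyRange 1 (grid.length : Int) 1).foldl
    (fun res i =>
      (PySem.List.pyRange 0
          (if grid.isEmpty then 0 else ((PySem.List.pyGetD grid 0 []).length : Int)) 1).foldl
        (fun res j => pvS res i j (max (pvG res i j) (pvG res (i - 1) j))) res)
    ((grid.map (fun row => row.map (fun x => x))).map (fun row =>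
      (PySem.List.pyRange
          ((if grid.isEmpty then 0 else ((PySem.List.pyGetD grid 0 []).length : Int)) - 2)
          (-1) (-1)).foldl
        (fun row j => PySem.List.pySetD row j
          (max (PySem.List.pyGetD row j 0) (PySem.List.pyGetD row (j + 1) 0))) row))

-- ===== PRECONDITION & SPEC =====
-- Pre_ is exactly the domain on which A returns normally: A (and B) raise IndexError
-- as soon as some row is shorter than the first row, so those grids are excluded.
def Pre_maxUpperRight (grid : List (List Int)) : Prop :=
  ∀ row ∈ grid, (grid.headD []).length ≤ row.length
instance (grid : List (List Int)) : Decidable (Pre_maxUpperRight grid) := by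
  unfold Pre_maxUpperRight; infer_instance

def pvWitness_maxUpperRight : List (List Int) := [[1, 2], [3, 4]]

def Spec_maxUpperRight (grid : List (List Int)) (out : List (List Int)) : Prop := out = maxUpperRight_alt grid
instance (grid : List (List Int)) (out : List (List Int)) : Decidable (Spec_maxUpperRight grid out) := by unfold Spec_maxUpperRight; infer_instance

-- ===== CLAIM (what is proved, stated in full; the proofs are below) =====
def Claim_equal_maxUpperRight : Prop := ∀ (grid : List (List Int)), Dom_maxUpperRight grid → Pre_maxUpperRight grid → Spec_maxUpperRight grid (maxUpperRight grid)

-- ===== LEMMAS AND PROOFS =====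

-- clean structural models used only in the proofs (n is the width len(grid[0]);
-- cells beyond column n are untouched by both programs)
def sufMax : List Int → List Int
  | [] => []
  | x :: xs =>
    match sufMax xs with
    | [] => [x]
    | y :: ys => max x y :: y :: ys

def aRow : List Int → List Int → List Int
  | p :: ps, x :: xs =>
    (match aRow ps xs with
     | [] => [max x p]
     | y :: ys => max (max x p) y :: y :: ys)
  | _, _ => []

def goAW (n : Nat) : List Int → List (List Int) → List (List Int)
  | _, [] => []
  | prev, r :: rs =>
    (aRow (prev.take n) (r.take n) ++ r.drop n)
      :: goAW n (aRow (prev.take n) (r.take n) ++ r.drop n) rs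

def goBW (n : Nat) : List Int → List (List Int) → List (List Int)
  | _, [] => []
  | prev, r :: rs =>
    (List.zipWith (fun a b => max a b) (r.take n) (prev.take n) ++ r.drop n)
      :: goBW n (List.zipWith (fun a b => max a b) (r.take n) (prev.take n) ++ r.drop n) rs

def NonInc (l : List Int) : Prop := l.IsChain (fun a b => b ≤ a)

def decList (n : Nat) : List Int := (List.range n).map (fun k => (n : Int) - 1 - (k : Nat))

lemma length_sufMax (r : List Int) : (sufMax r).length = r.length := by
  induction r with
  | nil => rfl
  | cons x xs ih =>
    rw [sufMax.eq_2]
    cases h : sufMax xs with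
    | nil =>
      rw [h] at ih
      simp only [List.length_nil] at ih
      obtain rfl : xs = [] := List.length_eq_zero_iff.mp ih.symm
      simp
    | cons y ys =>
      rw [h] at ih
      simp at ih ⊢
      omega

lemma length_aRow (r : List Int) : ∀ prev : List Int, prev.length = r.length →
    (aRow prev r).length = r.length := by
  induction r with
  | nil => intro prev _; cases prev <;> rfl
  | cons x xs ih =>
    intro prev hp
    cases prev with
    | nil => simp at hp
    | cons p ps =>
      rw [aRow.eq_1]
      have := ih ps (by simpa using hp)
      cases h : aRow ps xs with
      | nil =>
        rw [h] at this
        simp only [List.length_nil] at this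
        obtain rfl : xs = [] := List.length_eq_zero_iff.mp this.symm
        simp
      | cons y ys =>
        rw [h] at this
        simp at this ⊢
        omega

lemma nonInc_sufMax (r : List Int) : NonInc (sufMax r) := by
  induction r with
  | nil => simp [sufMax, NonInc]
  | cons x xs ih =>
    rw [sufMax.eq_2]
    cases h : sufMax xs with
    | nil => simp [NonInc]
    | cons y ys =>
      rw [h] at ih
      show NonInc (max x y :: y :: ys)
      unfold NonInc at ih ⊢
      rw [List.isChain_cons]
      exact ⟨by intro z hz; simp at hz; subst hz; exact le_max_right x y, ih⟩

lemma nonInc_zipWith (p : List Int) : ∀ q : List Int, NonInc p → NonInc q →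
    NonInc (List.zipWith (fun a b => max a b) p q) := by
  induction p with
  | nil => intro q _ _; simp [NonInc]
  | cons a ps ih =>
    intro q hp hq
    cases q with
    | nil => simp [NonInc]
    | cons b qs =>
      rw [List.zipWith_cons_cons]
      unfold NonInc
      rw [List.isChain_cons]
      constructor
      · intro y hy
        cases ps with
        | nil => simp at hy
        | cons a' ps' =>
          cases qs with
          | nil => simp at hy
          | cons b' qs' =>
            rw [List.zipWith_cons_cons] at hy
            simp at hy
            subst hy
            have ha : a' ≤ a := by
              unfold NonInc at hp
              rw [List.isChain_cons] at hp
              exact hp.1 a' (by simp)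
            have hb : b' ≤ b := by
              unfold NonInc at hq
              rw [List.isChain_cons] at hq
              exact hq.1 b' (by simp)
            exact max_le_max ha hb
      · exact ih qs (List.IsChain.tail hp) (List.IsChain.tail hq)

lemma aRow_eq_zipWith (r : List Int) : ∀ prev : List Int, NonInc prev →
    prev.length = r.length →
    aRow prev r = List.zipWith (fun a b => max a b) prev (sufMax r) := by
  induction r with
  | nil => intro prev _ _; cases prev <;> rfl
  | cons x xs ih =>
    intro prev hni hp
    cases prev with
    | nil => simp at hp
    | cons p ps =>
      have hlen : ps.length = xs.length := by simpa using hp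
      have hih := ih ps (List.IsChain.tail hni) hlen
      cases hxs : xs with
      | nil =>
        subst hxs
        have hps : ps = [] := by simpa using hlen
        subst hps
        simp [aRow, sufMax, max_comm]
      | cons z zs =>
        subst hxs
        have hsne : sufMax (z :: zs) ≠ [] := by
          intro h
          have := length_sufMax (z :: zs)
          rw [h] at this; simp at this
        obtain ⟨y, t, hyt⟩ := List.exists_cons_of_ne_nil hsne
        obtain ⟨p₁, ps', hps⟩ : ∃ p₁ ps', ps = p₁ :: ps' := by
          cases ps with
          | nil => simp at hlen
          | cons a b => exact ⟨a, b, rfl⟩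
        subst hps
        have hp1 : p₁ ≤ p := by
          unfold NonInc at hni
          rw [List.isChain_cons] at hni
          exact hni.1 p₁ (by simp)
        rw [hyt, List.zipWith_cons_cons] at hih
        rw [aRow.eq_1, hih, sufMax.eq_2, hyt, List.zipWith_cons_cons, List.zipWith_cons_cons]
        have hhead : max (max x p) (max p₁ y) = max p (max x y) := by omega
        simp [hhead]

-- ---------- port A equals the model ----------

-- the row-level effect of A's inner loop, extracted from the matrix
def g0row (nI : Int) (r : List Int) (j : Int) : List Int :=
  if j == nI - 1 then r
  else PySem.List.pySetD r j
    (max (PySem.List.pyGetD r j 0) (PySem.List.pyGetD r (j + 1) 0))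

def gRowP (nI : Int) (prev r : List Int) (j : Int) : List Int :=
  if j == nI - 1 then
    PySem.List.pySetD r j (max (PySem.List.pyGetD r j 0) (PySem.List.pyGetD prev j 0))
  else
    PySem.List.pySetD r j
      (max (max (PySem.List.pyGetD r j 0) (PySem.List.pyGetD prev j 0))
        (PySem.List.pyGetD r (j + 1) 0))

lemma decList_succ (n : Nat) : decList (n + 1) = (n : Int) :: decList n := by
  unfold decList
  rw [List.range_succ_eq_map, List.map_cons, List.map_map]
  congr 1
  · push_cast; ring
  · apply List.map_congr_left
    intro k _
    simp only [Function.comp_apply]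
    push_cast; ring

lemma decList_eq_pyRange (n : Nat) :
    PySem.List.pyRange ((n : Int) - 1) (-1) (-1) = decList n := by
  rw [PySem.List.pyRange_neg_one]
  unfold decList
  have h : ((n : Int) - 1 - (-1)).toNat = n := by omega
  rw [h]

lemma pyGetD_append_lt {α : Type} (a b : List α) (k : Nat) (d : α) (h : k < a.length) :
    PySem.List.pyGetD (a ++ b) (k : Int) d = a.getD k d := by
  rw [PySem.List.pyGetD_natCast]
  simp [List.getD_eq_getElem?_getD, List.getElem?_append_left h]

lemma pyGetD_append_ge {α : Type} (a b : List α) (k : Nat) (d : α) (h : a.length ≤ k) :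
    PySem.List.pyGetD (a ++ b) (k : Int) d = b.getD (k - a.length) d := by
  rw [PySem.List.pyGetD_natCast]
  simp [List.getD_eq_getElem?_getD, List.getElem?_append_right h]

lemma take_set_last (r : List Int) (k : Nat) (v : Int) (h : k < r.length) :
    (r.take (k + 1)).set k v = r.take k ++ [v] := by
  rw [List.take_add_one, List.getElem?_eq_getElem h]
  rw [List.set_append]
  have hlt : ¬ (k < (r.take k).length) := by simp
  rw [if_neg hlt]
  simp only [List.length_take]
  rw [show k - min k r.length = 0 from by omega]
  simp

lemma step0 (r : List Int) (k : Nat) (hk : k + 1 < r.length) :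
    g0row ((r.length : Int)) (r.take (k + 1) ++ sufMax (r.drop (k + 1))) (k : Int)
      = r.take k ++ sufMax (r.drop k) := by
  have hcond : ((k : Int) == (r.length : Int) - 1) = false := by
    simp only [beq_eq_false_iff_ne, ne_eq]
    omega
  unfold g0row
  rw [hcond]
  simp only [Bool.false_eq_true, if_false]
  have hMne : sufMax (r.drop (k + 1)) ≠ [] := by
    intro h
    have := length_sufMax (r.drop (k + 1))
    rw [h] at this
    simp at this
    omega
  obtain ⟨y, ys, hM⟩ := List.exists_cons_of_ne_nil hMne
  have hT : (r.take (k + 1)).length = k + 1 := by simp; omega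
  have hread1 : PySem.List.pyGetD (r.take (k + 1) ++ sufMax (r.drop (k + 1))) (k : Int) 0
      = r[k]'(by omega) := by
    rw [pyGetD_append_lt _ _ _ _ (by omega)]
    rw [List.getD_eq_getElem?_getD, List.getElem?_take]
    rw [if_pos (by omega), List.getElem?_eq_getElem (by omega : k < r.length)]
    rfl
  have hread2 : PySem.List.pyGetD (r.take (k + 1) ++ sufMax (r.drop (k + 1))) ((k : Int) + 1) 0
      = y := by
    have hcast : (k : Int) + 1 = ((k + 1 : Nat) : Int) := by push_cast; ring
    rw [hcast, pyGetD_append_ge _ _ _ _ (by omega)]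
    rw [hT, hM]
    simp
  rw [hread1, hread2]
  rw [PySem.List.pySetD_natCast]
  rw [List.set_append, if_pos (by omega)]
  rw [take_set_last _ _ _ (by omega)]
  rw [List.drop_eq_getElem_cons (by omega : k < r.length), sufMax.eq_2, hM]
  simp

lemma core0 (r : List Int) : ∀ k : Nat, k < r.length →
    (decList k).foldl (g0row (r.length : Int)) (r.take k ++ sufMax (r.drop k)) = sufMax r := by
  intro k
  induction k with
  | zero => intro _; simp [decList]
  | succ k ih =>
    intro hk
    rw [decList_succ, List.foldl_cons, step0 r k hk]
    exact ih (by omega)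

lemma row0 (r : List Int) :
    (decList r.length).foldl (g0row (r.length : Int)) r = sufMax r := by
  cases hr : r.length with
  | zero =>
    obtain rfl : r = [] := List.length_eq_zero_iff.mp hr
    simp [decList, sufMax]
  | succ m =>
    rw [decList_succ, List.foldl_cons]
    have hm : m < r.length := by omega
    have hstep : g0row (((m + 1 : Nat) : Int)) r (m : Int) = r := by
      unfold g0row
      rw [if_pos (by simp only [beq_iff_eq]; push_cast; ring)]
    rw [hstep]
    have hstate : r.take m ++ sufMax (r.drop m) = r := by
      have hdrop : r.drop m = [r[m]] := by
        rw [List.drop_eq_getElem_cons hm]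
        have h2 : r.drop (m + 1) = [] := List.drop_eq_nil_of_le (by omega)
        rw [h2]
      rw [hdrop, show sufMax [r[m]] = [r[m]] from rfl]
      have h3 : r.take m ++ [r[m]] = r.take (m + 1) := by
        rw [List.take_add_one, List.getElem?_eq_getElem hm]
        rfl
      rw [h3]
      exact List.take_of_length_le (by omega)
    conv_lhs => rw [show r = r.take m ++ sufMax (r.drop m) from hstate.symm]
    rw [show ((m + 1 : Nat) : Int) = ((r.length : Nat) : Int) from by rw [hr]]
    exact core0 r m hm

lemma stepi (r prev : List Int) (k : Nat) (hk : k + 1 < r.length)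
    (hp : prev.length = r.length) :
    gRowP ((r.length : Int)) prev
        (r.take (k + 1) ++ aRow (prev.drop (k + 1)) (r.drop (k + 1))) (k : Int)
      = r.take k ++ aRow (prev.drop k) (r.drop k) := by
  have hcond : ((k : Int) == (r.length : Int) - 1) = false := by
    simp only [beq_eq_false_iff_ne, ne_eq]
    omega
  unfold gRowP
  rw [hcond]
  simp only [Bool.false_eq_true, if_false]
  have hMne : aRow (prev.drop (k + 1)) (r.drop (k + 1)) ≠ [] := by
    intro h
    have := length_aRow (r.drop (k + 1)) (prev.drop (k + 1)) (by simp [hp])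
    rw [h] at this
    simp at this
    omega
  obtain ⟨y, ys, hM⟩ := List.exists_cons_of_ne_nil hMne
  have hT : (r.take (k + 1)).length = k + 1 := by simp; omega
  have hread1 : PySem.List.pyGetD
      (r.take (k + 1) ++ aRow (prev.drop (k + 1)) (r.drop (k + 1))) (k : Int) 0
      = r[k]'(by omega) := by
    rw [pyGetD_append_lt _ _ _ _ (by omega)]
    rw [List.getD_eq_getElem?_getD, List.getElem?_take]
    rw [if_pos (by omega), List.getElem?_eq_getElem (by omega : k < r.length)]
    rfl
  have hreadp : PySem.List.pyGetD prev (k : Int) 0 = prev[k]'(by omega) :=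
    by rw [PySem.List.pyGetD_natCast]; exact List.getD_eq_getElem _ _ (by omega)
  have hread2 : PySem.List.pyGetD
      (r.take (k + 1) ++ aRow (prev.drop (k + 1)) (r.drop (k + 1))) ((k : Int) + 1) 0
      = y := by
    have hcast : (k : Int) + 1 = ((k + 1 : Nat) : Int) := by push_cast; ring
    rw [hcast, pyGetD_append_ge _ _ _ _ (by omega)]
    rw [hT, hM]
    simp
  rw [hread1, hreadp, hread2]
  rw [PySem.List.pySetD_natCast]
  rw [List.set_append, if_pos (by omega)]
  rw [take_set_last _ _ _ (by omega)]
  rw [List.drop_eq_getElem_cons (by omega : k < r.length),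
    List.drop_eq_getElem_cons (by omega : k < prev.length)]
  rw [aRow.eq_1, hM]
  simp

lemma corei (r prev : List Int) (hp : prev.length = r.length) : ∀ k : Nat, k < r.length →
    (decList k).foldl (gRowP (r.length : Int) prev)
        (r.take k ++ aRow (prev.drop k) (r.drop k)) = aRow prev r := by
  intro k
  induction k with
  | zero => intro _; simp [decList]
  | succ k ih =>
    intro hk
    rw [decList_succ, List.foldl_cons, stepi r prev k hk hp]
    exact ih (by omega)

lemma rowi (r prev : List Int) (hp : prev.length = r.length) :
    (decList r.length).foldl (gRowP (r.length : Int) prev) r = aRow prev r := by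
  cases hr : r.length with
  | zero =>
    obtain rfl : r = [] := List.length_eq_zero_iff.mp hr
    cases prev <;> simp [decList, aRow]
  | succ m =>
    rw [decList_succ, List.foldl_cons]
    have hm : m < r.length := by omega
    have hmp : m < prev.length := by omega
    have hstep : gRowP (((m + 1 : Nat) : Int)) prev r (m : Int)
        = r.take m ++ aRow (prev.drop m) (r.drop m) := by
      unfold gRowP
      rw [if_pos (by simp only [beq_iff_eq]; push_cast; ring)]
      have hg1 : PySem.List.pyGetD r (m : Int) 0 = r[m] := by
        rw [PySem.List.pyGetD_natCast]; exact List.getD_eq_getElem _ _ hm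
      have hg2 : PySem.List.pyGetD prev (m : Int) 0 = prev[m] := by
        rw [PySem.List.pyGetD_natCast]; exact List.getD_eq_getElem _ _ hmp
      rw [hg1, hg2, PySem.List.pySetD_natCast]
      have hset : r.set m (max r[m] prev[m]) = r.take m ++ [max r[m] prev[m]] := by
        rw [List.set_eq_take_append_cons_drop, if_pos hm,
          List.drop_eq_nil_of_le (by omega : r.length ≤ m + 1)]
      have hdropr : r.drop m = [r[m]] := by
        rw [List.drop_eq_getElem_cons hm, List.drop_eq_nil_of_le (by omega : r.length ≤ m + 1)]
      have hdropp : prev.drop m = [prev[m]] := by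
        rw [List.drop_eq_getElem_cons hmp, List.drop_eq_nil_of_le (by omega : prev.length ≤ m + 1)]
      rw [hset, hdropr, hdropp]
      rfl
    rw [hstep]
    rw [show ((m + 1 : Nat) : Int) = ((r.length : Nat) : Int) from by rw [hr]]
    exact corei r prev hp m hm


lemma pySetD_getD_self (dp : List (List Int)) (k : Nat) (h : k < dp.length) :
    PySem.List.pySetD dp (k : Int) (PySem.List.pyGetD dp (k : Int) []) = dp := by
  rw [PySem.List.pyGetD_natCast, PySem.List.pySetD_natCast,
    List.getD_eq_getElem _ _ h, List.set_getElem_self]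

lemma rowloc0 (nI : Int) (L : List Int) : ∀ dp : List (List Int), 0 < dp.length →
    L.foldl (fun dp j =>
        if j == nI - 1 then dp
        else pvS dp 0 j (max (pvG dp 0 j) (pvG dp 0 (j + 1)))) dp
      = PySem.List.pySetD dp 0 (L.foldl (g0row nI) (PySem.List.pyGetD dp 0 [])) := by
  induction L with
  | nil =>
    intro dp h
    rw [List.foldl_nil, List.foldl_nil,
      show (0 : Int) = ((0 : Nat) : Int) from rfl, pySetD_getD_self dp 0 h]
  | cons j L' ih =>
    intro dp h
    simp only [List.foldl_cons]
    by_cases hj : (j == nI - 1) = true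
    · rw [if_pos hj, show g0row nI (PySem.List.pyGetD dp 0 []) j = PySem.List.pyGetD dp 0 []
        from by unfold g0row; rw [if_pos hj]]
      exact ih dp h
    · rw [if_neg hj, show g0row nI (PySem.List.pyGetD dp 0 []) j
          = PySem.List.pySetD (PySem.List.pyGetD dp 0 []) j
              (max (PySem.List.pyGetD (PySem.List.pyGetD dp 0 []) j 0)
                (PySem.List.pyGetD (PySem.List.pyGetD dp 0 []) (j + 1) 0))
        from by unfold g0row; rw [if_neg hj]]
      rw [ih (pvS dp 0 j (max (pvG dp 0 j) (pvG dp 0 (j + 1))))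
        (by simp only [pvS, PySem.List.length_pySetD]; exact h)]
      simp only [pvS, pvG]
      rw [show (0 : Int) = ((0 : Nat) : Int) from rfl]
      rw [PySem.List.pyGetD_pySetD_natCast _ _ _ _ _ h]
      rw [if_pos rfl]
      rw [PySem.List.pySetD_natCast, PySem.List.pySetD_natCast, List.set_set,
        ← PySem.List.pySetD_natCast]

lemma rowloci (nI : Int) (k : Nat) (hk1 : 1 ≤ k) (L : List Int) :
    ∀ dp : List (List Int), k < dp.length →
    L.foldl (fun dp j =>
        if j == nI - 1 then
          pvS dp (k : Int) j (max (pvG dp (k : Int) j) (pvG dp ((k : Int) - 1) j))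
        else
          pvS dp (k : Int) j
            (max (max (pvG dp (k : Int) j) (pvG dp ((k : Int) - 1) j))
              (pvG dp (k : Int) (j + 1)))) dp
      = PySem.List.pySetD dp (k : Int)
          (L.foldl (gRowP nI (PySem.List.pyGetD dp ((k : Int) - 1) []))
            (PySem.List.pyGetD dp (k : Int) [])) := by
  have hc : (k : Int) - 1 = ((k - 1 : Nat) : Int) := by omega
  induction L with
  | nil =>
    intro dp h
    rw [List.foldl_nil, List.foldl_nil, pySetD_getD_self dp k h]
  | cons j L' ih =>
    intro dp h
    simp only [List.foldl_cons]
    have hbody :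
        (if j == nI - 1 then
          pvS dp (k : Int) j (max (pvG dp (k : Int) j) (pvG dp ((k : Int) - 1) j))
        else
          pvS dp (k : Int) j
            (max (max (pvG dp (k : Int) j) (pvG dp ((k : Int) - 1) j))
              (pvG dp (k : Int) (j + 1))))
        = PySem.List.pySetD dp (k : Int)
            (gRowP nI (PySem.List.pyGetD dp ((k : Int) - 1) [])
              (PySem.List.pyGetD dp (k : Int) []) j) := by
      unfold gRowP pvS pvG
      rw [apply_ite (PySem.List.pySetD dp (k : Int))]
    rw [hbody]
    rw [ih (PySem.List.pySetD dp (k : Int)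
        (gRowP nI (PySem.List.pyGetD dp ((k : Int) - 1) [])
          (PySem.List.pyGetD dp (k : Int) []) j))
      (by rw [PySem.List.length_pySetD]; exact h)]
    rw [hc]
    rw [PySem.List.pyGetD_pySetD_natCast _ _ _ _ _ h, if_neg (by omega)]
    rw [PySem.List.pyGetD_pySetD_natCast _ _ _ _ _ h, if_pos rfl]
    rw [PySem.List.pySetD_natCast, PySem.List.pySetD_natCast, List.set_set,
      ← PySem.List.pySetD_natCast]


-- ---------- window lemmas: both programs only touch columns < n ----------

lemma mem_decList (n : Nat) (j : Int) (h : j ∈ decList n) : 0 ≤ j ∧ j < (n : Int) := by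
  unfold decList at h
  simp at h
  obtain ⟨k, hk, rfl⟩ := h
  omega

lemma length_gRowP (nI : Int) (prev r : List Int) (j : Int) :
    (gRowP nI prev r j).length = r.length := by
  unfold gRowP
  split_ifs <;> rw [PySem.List.length_pySetD]

lemma window_gRowP (n : Nat) (prev : List Int) (L : List Int) :
    (∀ j ∈ L, 0 ≤ j ∧ j < (n : Int)) →
    ∀ (X C : List Int), X.length = n →
    L.foldl (gRowP (n : Int) prev) (X ++ C) = (L.foldl (gRowP (n : Int) prev) X) ++ C := by
  induction L with
  | nil => intro _ X C _; simp
  | cons j L' ih =>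
    intro hL X C hX
    obtain ⟨hj0, hjn⟩ := hL j (by simp)
    simp only [List.foldl_cons]
    have hstep : gRowP (n : Int) prev (X ++ C) j = (gRowP (n : Int) prev X j) ++ C := by
      unfold gRowP
      by_cases hb : (j == (n : Int) - 1) = true
      · rw [if_pos hb, if_pos hb]
        rw [show j = ((j.toNat : Nat) : Int) from by omega]
        rw [pyGetD_append_lt _ _ _ _ (by omega : j.toNat < X.length)]
        simp only [PySem.List.pyGetD_natCast, PySem.List.pySetD_natCast]
        rw [List.set_append, if_pos (by omega : j.toNat < X.length)]
      · rw [if_neg hb, if_neg hb]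
        have hj1 : j.toNat + 1 < n := by
          simp only [beq_iff_eq] at hb
          omega
        rw [show j = ((j.toNat : Nat) : Int) from by omega]
        rw [show ((j.toNat : Nat) : Int) + 1 = ((j.toNat + 1 : Nat) : Int) from by push_cast; ring]
        rw [pyGetD_append_lt _ _ _ _ (by omega : j.toNat < X.length)]
        rw [pyGetD_append_lt _ _ _ _ (by omega : j.toNat + 1 < X.length)]
        simp only [PySem.List.pyGetD_natCast, PySem.List.pySetD_natCast]
        rw [List.set_append, if_pos (by omega : j.toNat < X.length)]
    rw [hstep]
    exact ih (fun j' hj' => hL j' (by simp [hj'])) _ C (by rw [length_gRowP, hX])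

lemma rowiW (r prev : List Int) (n : Nat) (hn : n ≤ r.length) (hp : n ≤ prev.length) :
    (decList n).foldl (gRowP (n : Int) prev) r
      = aRow (prev.take n) (r.take n) ++ r.drop n := by
  conv_lhs => rw [← List.take_append_drop n r]
  rw [window_gRowP n prev (decList n) (fun j hj => mem_decList n j hj) (r.take n) (r.drop n)
    (by simp [hn])]
  congr 1
  have hcongr : (decList n).foldl (gRowP (n : Int) prev) (r.take n)
      = (decList n).foldl (gRowP (n : Int) (prev.take n)) (r.take n) := by
    apply PySem.List.foldl_congr_mem
    intro acc j hj
    obtain ⟨hj0, hjn⟩ := mem_decList n j hj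
    have e : PySem.List.pyGetD prev j 0 = PySem.List.pyGetD (prev.take n) j 0 := by
      rw [show j = ((j.toNat : Nat) : Int) from by omega]
      rw [PySem.List.pyGetD_natCast, PySem.List.pyGetD_natCast]
      rw [List.getD_eq_getElem?_getD, List.getD_eq_getElem?_getD, List.getElem?_take,
        if_pos (by omega)]
    unfold gRowP
    rw [e]
  rw [hcongr]
  have hL : (r.take n).length = n := by simp [hn]
  have hrect := rowi (r.take n) (prev.take n) (by simp only [List.length_take]; omega)
  rw [hL] at hrect
  exact hrect

-- ---------- B's pass 1 row loop equals the suffix-max window ----------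

lemma pass1w (w : List Int) :
    (decList (w.length - 1)).foldl
      (fun row j => PySem.List.pySetD row j
        (max (PySem.List.pyGetD row j 0) (PySem.List.pyGetD row (j + 1) 0))) w
    = sufMax w := by
  cases hw : w.length with
  | zero =>
    obtain rfl : w = [] := List.length_eq_zero_iff.mp hw
    simp [decList, sufMax]
  | succ m =>
    have h0 := row0 w
    rw [hw, decList_succ, List.foldl_cons] at h0
    rw [show g0row ((m + 1 : Nat) : Int) w (m : Int) = w from by
      unfold g0row; rw [if_pos (by simp only [beq_iff_eq]; push_cast; ring)]] at h0
    simp only [Nat.add_sub_cancel]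
    rw [← h0]
    apply PySem.List.foldl_congr_mem
    intro acc j hj
    obtain ⟨hj0, hjm⟩ := mem_decList m j hj
    unfold g0row
    rw [if_neg (by simp only [beq_iff_eq]; push_cast; omega)]

lemma window_g1 (n : Nat) (L : List Int) :
    (∀ j ∈ L, 0 ≤ j ∧ j + 1 < (n : Int)) →
    ∀ (X C : List Int), X.length = n →
    L.foldl (fun row j => PySem.List.pySetD row j
        (max (PySem.List.pyGetD row j 0) (PySem.List.pyGetD row (j + 1) 0))) (X ++ C)
    = (L.foldl (fun row j => PySem.List.pySetD row j
        (max (PySem.List.pyGetD row j 0) (PySem.List.pyGetD row (j + 1) 0))) X) ++ C := by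
  induction L with
  | nil => intro _ X C _; simp
  | cons j L' ih =>
    intro hL X C hX
    obtain ⟨hj0, hjn⟩ := hL j (by simp)
    simp only [List.foldl_cons]
    have hstep : PySem.List.pySetD (X ++ C) j
          (max (PySem.List.pyGetD (X ++ C) j 0) (PySem.List.pyGetD (X ++ C) (j + 1) 0))
        = (PySem.List.pySetD X j
          (max (PySem.List.pyGetD X j 0) (PySem.List.pyGetD X (j + 1) 0))) ++ C := by
      rw [show j = ((j.toNat : Nat) : Int) from by omega]
      rw [show ((j.toNat : Nat) : Int) + 1 = ((j.toNat + 1 : Nat) : Int) from by push_cast; ring]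
      rw [pyGetD_append_lt _ _ _ _ (by omega : j.toNat < X.length)]
      rw [pyGetD_append_lt _ _ _ _ (by omega : j.toNat + 1 < X.length)]
      rw [PySem.List.pyGetD_natCast, PySem.List.pyGetD_natCast]
      rw [PySem.List.pySetD_natCast, PySem.List.pySetD_natCast]
      rw [List.set_append, if_pos (by omega : j.toNat < X.length)]
    rw [hstep]
    exact ih (fun j' hj' => hL j' (by simp [hj'])) _ C (by simp only [PySem.List.length_pySetD, hX])

lemma pass1_full (row : List Int) (n : Nat) (hn : n ≤ row.length) :
    (PySem.List.pyRange ((n : Int) - 2) (-1) (-1)).foldl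
      (fun row j => PySem.List.pySetD row j
        (max (PySem.List.pyGetD row j 0) (PySem.List.pyGetD row (j + 1) 0))) row
    = sufMax (row.take n) ++ row.drop n := by
  have hR : PySem.List.pyRange ((n : Int) - 2) (-1) (-1) = decList (n - 1) := by
    rw [PySem.List.pyRange_neg_one]
    unfold decList
    rw [show ((n : Int) - 2 - (-1)).toNat = n - 1 from by omega]
    apply List.map_congr_left
    intro k hk
    simp only [List.mem_range] at hk
    omega
  rw [hR]
  conv_lhs => rw [← List.take_append_drop n row]
  rw [window_g1 n (decList (n - 1))
    (fun j hj => by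
      obtain ⟨h1, h2⟩ := mem_decList (n - 1) j hj
      exact ⟨h1, by omega⟩)
    (row.take n) (row.drop n) (by simp [hn])]
  congr 1
  have hL : (row.take n).length = n := by simp [hn]
  rw [show n - 1 = (row.take n).length - 1 from by rw [hL]]
  exact pass1w (row.take n)

-- ---------- B's pass 2 row loop equals the column-max window ----------

def gColP (prev r : List Int) (j : Int) : List Int :=
  PySem.List.pySetD r j (max (PySem.List.pyGetD r j 0) (PySem.List.pyGetD prev j 0))

lemma colfold (p : List Int) : ∀ (d k : Nat) (w : List Int), w.length = k + d → p.length = k + d →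
    (PySem.List.pyRange (k : Int) ((k + d : Nat) : Int) 1).foldl (gColP p)
      (List.zipWith (fun a b => max a b) (w.take k) (p.take k) ++ w.drop k)
    = List.zipWith (fun a b => max a b) w p := by
  intro d
  induction d with
  | zero =>
    intro k w hw hp
    rw [PySem.List.pyRange_one_eq_nil (by omega)]
    rw [List.foldl_nil]
    rw [List.take_of_length_le (by omega), List.take_of_length_le (by omega),
      List.drop_eq_nil_of_le (by omega)]
    simp
  | succ d ih =>
    intro k w hw hp
    have hk : k < w.length := by omega
    have hkp : k < p.length := by omega
    rw [PySem.List.pyRange_one_cons (by push_cast; omega)]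
    rw [List.foldl_cons]
    have hZ : (List.zipWith (fun a b => max a b) (w.take k) (p.take k)).length = k := by
      simp [List.length_zipWith]
      omega
    have hstep : gColP p
        (List.zipWith (fun a b => max a b) (w.take k) (p.take k) ++ w.drop k) (k : Int)
        = List.zipWith (fun a b => max a b) (w.take (k + 1)) (p.take (k + 1)) ++ w.drop (k + 1) := by
      unfold gColP
      rw [pyGetD_append_ge _ _ _ _ (by omega), hZ]
      rw [show k - k = 0 from by omega]
      rw [List.drop_eq_getElem_cons hk]
      rw [PySem.List.pyGetD_natCast p, List.getD_eq_getElem _ _ hkp]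
      rw [PySem.List.pySetD_natCast]
      rw [List.set_append, if_neg (by omega), hZ]
      rw [show k - k = 0 from by omega, List.set_cons_zero]
      rw [List.take_add_one, List.take_add_one,
        List.getElem?_eq_getElem hk, List.getElem?_eq_getElem hkp]
      rw [List.zipWith_append (by simp; omega)]
      simp [List.getD_eq_getElem?_getD, List.getElem?_eq_getElem hk]
    rw [hstep]
    rw [show (k : Int) + 1 = ((k + 1 : Nat) : Int) from by push_cast; ring]
    rw [show ((k + (d + 1) : Nat) : Int) = (((k + 1) + d : Nat) : Int) from by push_cast; ring]
    exact ih (k + 1) w (by omega) (by omega)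

lemma window_gColP (n : Nat) (prev : List Int) (L : List Int) :
    (∀ j ∈ L, 0 ≤ j ∧ j < (n : Int)) →
    ∀ (X C : List Int), X.length = n →
    L.foldl (gColP prev) (X ++ C) = (L.foldl (gColP prev) X) ++ C := by
  induction L with
  | nil => intro _ X C _; simp
  | cons j L' ih =>
    intro hL X C hX
    obtain ⟨hj0, hjn⟩ := hL j (by simp)
    simp only [List.foldl_cons]
    have hstep : gColP prev (X ++ C) j = (gColP prev X j) ++ C := by
      unfold gColP
      rw [show j = ((j.toNat : Nat) : Int) from by omega]
      rw [pyGetD_append_lt _ _ _ _ (by omega : j.toNat < X.length)]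
      simp only [PySem.List.pyGetD_natCast, PySem.List.pySetD_natCast]
      rw [List.set_append, if_pos (by omega : j.toNat < X.length)]
    rw [hstep]
    exact ih (fun j' hj' => hL j' (by simp [hj'])) _ C
      (by unfold gColP; rw [PySem.List.length_pySetD, hX])

lemma colW (r prev : List Int) (n : Nat) (hn : n ≤ r.length) (hp : n ≤ prev.length) :
    (PySem.List.pyRange 0 (n : Int) 1).foldl (gColP prev) r
    = List.zipWith (fun a b => max a b) (r.take n) (prev.take n) ++ r.drop n := by
  conv_lhs => rw [← List.take_append_drop n r]
  rw [window_gColP n prev (PySem.List.pyRange 0 (n : Int) 1)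
    (fun j hj => by rw [PySem.List.mem_pyRange_one] at hj; exact hj)
    (r.take n) (r.drop n) (by simp [hn])]
  congr 1
  have hcongr : (PySem.List.pyRange 0 (n : Int) 1).foldl (gColP prev) (r.take n)
      = (PySem.List.pyRange 0 (n : Int) 1).foldl (gColP (prev.take n)) (r.take n) := by
    apply PySem.List.foldl_congr_mem
    intro acc j hj
    rw [PySem.List.mem_pyRange_one] at hj
    have e : PySem.List.pyGetD prev j 0 = PySem.List.pyGetD (prev.take n) j 0 := by
      rw [show j = ((j.toNat : Nat) : Int) from by omega]
      rw [PySem.List.pyGetD_natCast, PySem.List.pyGetD_natCast]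
      rw [List.getD_eq_getElem?_getD, List.getD_eq_getElem?_getD, List.getElem?_take,
        if_pos (by omega)]
    unfold gColP
    rw [e]
  rw [hcongr]
  have h0 := colfold (prev.take n) n 0 (r.take n) (by simp only [List.length_take]; omega) (by simp only [List.length_take]; omega)
  simp only [List.take_zero, List.zipWith_nil_left, List.nil_append, List.drop_zero,
    Nat.zero_add, Nat.cast_zero] at h0
  exact h0

-- ---------- matrix-level: locate the row being written (B's pass 2) ----------

lemma rowlocC (k : Nat) (hk1 : 1 ≤ k) (L : List Int) :
    ∀ dp : List (List Int), k < dp.length →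
    L.foldl (fun res j =>
        pvS res (k : Int) j (max (pvG res (k : Int) j) (pvG res ((k : Int) - 1) j))) dp
      = PySem.List.pySetD dp (k : Int)
          (L.foldl (gColP (PySem.List.pyGetD dp ((k : Int) - 1) []))
            (PySem.List.pyGetD dp (k : Int) [])) := by
  have hc : (k : Int) - 1 = ((k - 1 : Nat) : Int) := by omega
  induction L with
  | nil =>
    intro dp h
    rw [List.foldl_nil, List.foldl_nil, pySetD_getD_self dp k h]
  | cons j L' ih =>
    intro dp h
    simp only [List.foldl_cons]
    have hbody :
        pvS dp (k : Int) j (max (pvG dp (k : Int) j) (pvG dp ((k : Int) - 1) j))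
        = PySem.List.pySetD dp (k : Int)
            (gColP (PySem.List.pyGetD dp ((k : Int) - 1) [])
              (PySem.List.pyGetD dp (k : Int) []) j) := by
      unfold gColP pvS pvG
      rfl
    rw [hbody]
    rw [ih (PySem.List.pySetD dp (k : Int)
        (gColP (PySem.List.pyGetD dp ((k : Int) - 1) [])
          (PySem.List.pyGetD dp (k : Int) []) j))
      (by rw [PySem.List.length_pySetD]; exact h)]
    rw [hc]
    rw [PySem.List.pyGetD_pySetD_natCast _ _ _ _ _ h, if_neg (by omega)]
    rw [PySem.List.pyGetD_pySetD_natCast _ _ _ _ _ h, if_pos rfl]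
    rw [PySem.List.pySetD_natCast, PySem.List.pySetD_natCast, List.set_set,
      ← PySem.List.pySetD_natCast]

-- ---------- matrix-level outer loops ----------

lemma length_rowAW (r prev : List Int) (n : Nat) (hn : n ≤ r.length) (hp : n ≤ prev.length) :
    (aRow (prev.take n) (r.take n) ++ r.drop n).length = r.length := by
  rw [List.length_append, length_aRow (r.take n) (prev.take n) (by simp only [List.length_take]; omega)]
  simp only [List.length_take, List.length_drop]
  omega

lemma outer (n : Nat) : ∀ (rest : List (List Int)), ∀ (done : List (List Int)) (b : Int),
    done ≠ [] →
    n ≤ (done.getLastD []).length →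
    (∀ r ∈ rest, n ≤ r.length) →
    b = (done.length : Int) + (rest.length : Int) →
    (PySem.List.pyRange ((done.length : Nat) : Int) b 1).foldl
      (fun dp i =>
        (PySem.List.pyRange ((n : Int) - 1) (-1) (-1)).foldl
          (fun dp j =>
            if i == 0 then
              if j == (n : Int) - 1 then dp
              else pvS dp i j (max (pvG dp i j) (pvG dp i (j + 1)))
            else
              if j == (n : Int) - 1 then pvS dp i j (max (pvG dp i j) (pvG dp (i - 1) j))
              else pvS dp i j (max (max (pvG dp i j) (pvG dp (i - 1) j)) (pvG dp i (j + 1))))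
          dp)
      (done ++ rest)
    = done ++ goAW n (done.getLastD []) rest := by
  intro rest
  induction rest with
  | nil =>
    intro done b hne hlen hrows hb
    rw [PySem.List.pyRange_one_eq_nil (by rw [hb]; simp only [List.length_nil]; push_cast; omega)]
    simp [goAW]
  | cons r rest' ih =>
    intro done b hne hlen hrows hb
    have hd1 : 1 ≤ done.length := by
      cases done with
      | nil => exact absurd rfl hne
      | cons a t => simp
    have hlt : ((done.length : Nat) : Int) < b := by
      rw [hb]; simp only [List.length_cons]; push_cast; omega
    rw [PySem.List.pyRange_one_cons hlt, List.foldl_cons]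
    have hi0 : (((done.length : Nat) : Int) == 0) = false := by
      simp only [beq_eq_false_iff_ne, ne_eq]
      omega
    simp only [hi0, Bool.false_eq_true, if_false]
    rw [rowloci ((n : Int)) done.length hd1 _ (done ++ r :: rest') (by simp)]
    have hprev : PySem.List.pyGetD (done ++ r :: rest')
        (((done.length : Nat) : Int) - 1) [] = done.getLastD [] := by
      rw [show ((done.length : Nat) : Int) - 1 = ((done.length - 1 : Nat) : Int) from by omega]
      rw [pyGetD_append_lt _ _ _ _ (by omega)]
      rw [List.getD_eq_getElem _ _ (by omega)]
      rw [List.getLastD_eq_getLast?, List.getLast?_eq_getElem?,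
        List.getElem?_eq_getElem (by omega)]
      rfl
    have hr' : PySem.List.pyGetD (done ++ r :: rest') ((done.length : Nat) : Int) [] = r := by
      rw [pyGetD_append_ge _ _ _ _ (le_refl _)]
      simp
    rw [hprev, hr']
    have hrn : n ≤ r.length := hrows r (by simp)
    have hinner : (PySem.List.pyRange ((n : Int) - 1) (-1) (-1)).foldl
        (gRowP (n : Int) (done.getLastD [])) r
        = aRow ((done.getLastD []).take n) (r.take n) ++ r.drop n := by
      rw [decList_eq_pyRange n]
      exact rowiW r (done.getLastD []) n hrn hlen
    rw [hinner]
    rw [show PySem.List.pySetD (done ++ r :: rest') ((done.length : Nat) : Int)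
          (aRow ((done.getLastD []).take n) (r.take n) ++ r.drop n)
        = (done ++ [aRow ((done.getLastD []).take n) (r.take n) ++ r.drop n]) ++ rest' from by
      rw [PySem.List.pySetD_natCast, List.set_append, if_neg (by omega)]
      rw [show done.length - done.length = 0 from by omega]
      rw [List.set_cons_zero]
      simp]
    rw [show ((done.length : Nat) : Int) + 1
        = (((done ++ [aRow ((done.getLastD []).take n) (r.take n) ++ r.drop n]).length
            : Nat) : Int) from by
      simp]
    rw [ih (done ++ [aRow ((done.getLastD []).take n) (r.take n) ++ r.drop n]) b (by simp)
      (by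
        rw [List.getLastD_concat, length_rowAW r (done.getLastD []) n hrn hlen]
        exact hrn)
      (fun r' h' => hrows r' (by simp [h']))
      (by rw [hb]
          simp only [List.length_cons, List.length_append, List.length_nil]
          push_cast; omega)]
    rw [List.getLastD_concat]
    simp only [goAW, List.append_assoc, List.singleton_append]

lemma length_goBW_row (r prev : List Int) (n : Nat) (hn : n ≤ r.length) (hp : n ≤ prev.length) :
    (List.zipWith (fun a b => max a b) (r.take n) (prev.take n) ++ r.drop n).length
      = r.length := by
  rw [List.length_append, List.length_zipWith]
  simp only [List.length_take, List.length_drop]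
  omega

lemma outerB (n : Nat) : ∀ (rest : List (List Int)), ∀ (done : List (List Int)) (b : Int),
    done ≠ [] →
    n ≤ (done.getLastD []).length →
    (∀ r ∈ rest, n ≤ r.length) →
    b = (done.length : Int) + (rest.length : Int) →
    (PySem.List.pyRange ((done.length : Nat) : Int) b 1).foldl
      (fun res i =>
        (PySem.List.pyRange 0 (n : Int) 1).foldl
          (fun res j => pvS res i j (max (pvG res i j) (pvG res (i - 1) j))) res)
      (done ++ rest)
    = done ++ goBW n (done.getLastD []) rest := by
  intro rest
  induction rest with
  | nil =>
    intro done b hne hlen hrows hb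
    rw [PySem.List.pyRange_one_eq_nil
      (a := ((done.length : Nat) : Int)) (b := b)
      (by rw [hb]; simp only [List.length_nil]; push_cast; omega)]
    simp [goBW]
  | cons r rest' ih =>
    intro done b hne hlen hrows hb
    have hd1 : 1 ≤ done.length := by
      cases done with
      | nil => exact absurd rfl hne
      | cons a t => simp
    have hlt : ((done.length : Nat) : Int) < b := by
      rw [hb]; simp only [List.length_cons]; push_cast; omega
    rw [PySem.List.pyRange_one_cons hlt, List.foldl_cons]
    rw [rowlocC done.length hd1 _ (done ++ r :: rest') (by simp)]
    have hprev : PySem.List.pyGetD (done ++ r :: rest')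
        (((done.length : Nat) : Int) - 1) [] = done.getLastD [] := by
      rw [show ((done.length : Nat) : Int) - 1 = ((done.length - 1 : Nat) : Int) from by omega]
      rw [pyGetD_append_lt _ _ _ _ (by omega)]
      rw [List.getD_eq_getElem _ _ (by omega)]
      rw [List.getLastD_eq_getLast?, List.getLast?_eq_getElem?,
        List.getElem?_eq_getElem (by omega)]
      rfl
    have hr' : PySem.List.pyGetD (done ++ r :: rest') ((done.length : Nat) : Int) [] = r := by
      rw [pyGetD_append_ge _ _ _ _ (le_refl _)]
      simp
    rw [hprev, hr']
    have hrn : n ≤ r.length := hrows r (by simp)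
    rw [colW r (done.getLastD []) n hrn hlen]
    rw [show PySem.List.pySetD (done ++ r :: rest') ((done.length : Nat) : Int)
          (List.zipWith (fun a b => max a b) (r.take n) ((done.getLastD []).take n) ++ r.drop n)
        = (done ++ [List.zipWith (fun a b => max a b) (r.take n) ((done.getLastD []).take n)
            ++ r.drop n]) ++ rest' from by
      rw [PySem.List.pySetD_natCast, List.set_append, if_neg (by omega)]
      rw [show done.length - done.length = 0 from by omega]
      rw [List.set_cons_zero]
      simp]
    rw [show ((done.length : Nat) : Int) + 1
        = (((done ++ [List.zipWith (fun a b => max a b) (r.take n)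
            ((done.getLastD []).take n) ++ r.drop n]).length : Nat) : Int) from by
      simp]
    rw [ih (done ++ [List.zipWith (fun a b => max a b) (r.take n)
        ((done.getLastD []).take n) ++ r.drop n]) b (by simp)
      (by
        rw [List.getLastD_concat, length_goBW_row r (done.getLastD []) n hrn hlen]
        exact hrn)
      (fun r' h' => hrows r' (by simp [h']))
      (by rw [hb]
          simp only [List.length_cons, List.length_append, List.length_nil]
          push_cast; omega)]
    rw [List.getLastD_concat]
    simp only [goBW, List.append_assoc, List.singleton_append]

-- ---------- the two bridges and the model equality ----------

lemma A_bridge (grid : List (List Int)) (hPre : Pre_maxUpperRight grid) :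
    maxUpperRight grid
      = (match grid with
         | [] => []
         | r :: rs => sufMax r :: goAW r.length (sufMax r) rs) := by
  cases grid with
  | nil =>
    unfold maxUpperRight
    rw [PySem.List.pyRange_one_eq_nil (by simp)]
    simp
  | cons r rs =>
    unfold maxUpperRight
    have hg0 : PySem.List.pyGetD (r :: rs) 0 [] = r := by
      rw [show (0 : Int) = ((0 : Nat) : Int) from rfl, PySem.List.pyGetD_natCast]
      rfl
    rw [hg0]
    rw [show (r :: rs).map (fun row => row.map (fun x => x)) = r :: rs from by simp]
    rw [PySem.List.pyRange_one_cons (by simp)]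
    rw [List.foldl_cons]
    simp only [show ((0 : Int) == 0) = true from rfl, if_true]
    have hstep : (PySem.List.pyRange ((r.length : Int) - 1) (-1) (-1)).foldl
        (fun dp j =>
          if j == (r.length : Int) - 1 then dp
          else pvS dp 0 j (max (pvG dp 0 j) (pvG dp 0 (j + 1)))) (r :: rs)
        = sufMax r :: rs := by
      rw [rowloc0 ((r.length : Int)) _ (r :: rs) (by simp), hg0,
        decList_eq_pyRange r.length, row0 r]
      rw [show (0 : Int) = ((0 : Nat) : Int) from rfl, PySem.List.pySetD_natCast,
        List.set_cons_zero]
    rw [hstep]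
    have ho := outer r.length rs [sufMax r] (((r :: rs).length : Nat) : Int)
      (by simp)
      (by rw [show ([sufMax r].getLastD []) = sufMax r from rfl, length_sufMax])
      (fun row hm => by
        have := hPre row (by simp [hm])
        simpa using this)
      (by simp only [List.length_cons, List.length_nil]
          push_cast; omega)
    rw [show (0 : Int) + 1 = (([sufMax r].length : Nat) : Int) from by simp]
    rw [show sufMax r :: rs = [sufMax r] ++ rs from rfl]
    rw [ho]
    rfl

lemma B_bridge (grid : List (List Int)) (hPre : Pre_maxUpperRight grid) :
    maxUpperRight_alt grid
      = (match grid with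
         | [] => []
         | r :: rs => sufMax r :: goBW r.length (sufMax r)
            (rs.map (fun row => sufMax (row.take r.length) ++ row.drop r.length))) := by
  cases grid with
  | nil =>
    unfold maxUpperRight_alt
    rw [PySem.List.pyRange_one_eq_nil (by simp)]
    simp
  | cons r rs =>
    unfold maxUpperRight_alt
    have hg0 : PySem.List.pyGetD (r :: rs) 0 [] = r := by
      rw [show (0 : Int) = ((0 : Nat) : Int) from rfl, PySem.List.pyGetD_natCast]
      rfl
    simp only [List.isEmpty_cons, Bool.false_eq_true, if_false]
    rw [hg0]
    rw [show (r :: rs).map (fun row => row.map (fun x => x)) = r :: rs from by simp]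
    rw [show (r :: rs).map (fun row =>
          (PySem.List.pyRange ((r.length : Int) - 2) (-1) (-1)).foldl
            (fun row j => PySem.List.pySetD row j
              (max (PySem.List.pyGetD row j 0) (PySem.List.pyGetD row (j + 1) 0))) row)
        = (r :: rs).map (fun row => sufMax (row.take r.length) ++ row.drop r.length) from
      List.map_congr_left (fun row hm =>
        pass1_full row r.length (by have := hPre row (by simp [hm]); simpa using this))]
    rw [List.map_cons]
    rw [show sufMax (r.take r.length) ++ r.drop r.length = sufMax r from by
      rw [List.take_of_length_le (le_refl _), List.drop_length, List.append_nil]]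
    have ho := outerB r.length (rs.map (fun row => sufMax (row.take r.length) ++ row.drop r.length))
      [sufMax r] (((r :: rs).length : Nat) : Int)
      (by simp)
      (by rw [show ([sufMax r].getLastD []) = sufMax r from rfl, length_sufMax])
      (fun row' hm' => by
        obtain ⟨row, hm, rfl⟩ := List.mem_map.mp hm'
        have hrow : r.length ≤ row.length := by
          have := hPre row (by simp [hm]); simpa using this
        rw [List.length_append, length_sufMax]
        simp only [List.length_take, List.length_drop]
        omega)
      (by simp only [List.length_cons, List.length_nil, List.length_map]
          push_cast; omega)
    rw [show PySem.List.pyRange 1 (((r :: rs).length : Nat) : Int) 1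
        = PySem.List.pyRange (([sufMax r].length : Nat) : Int)
            (((r :: rs).length : Nat) : Int) 1 from by norm_num]
    rw [show sufMax r :: rs.map (fun row => sufMax (row.take r.length) ++ row.drop r.length)
        = [sufMax r] ++ rs.map (fun row => sufMax (row.take r.length) ++ row.drop r.length)
        from rfl]
    rw [ho]
    rfl

lemma goAW_eq_goBW (rs : List (List Int)) : ∀ (prev : List Int) (n : Nat),
    NonInc (prev.take n) → n ≤ prev.length → (∀ r ∈ rs, n ≤ r.length) →
    goAW n prev rs
      = goBW n prev (rs.map (fun row => sufMax (row.take n) ++ row.drop n)) := by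
  induction rs with
  | nil => intro prev n _ _ _; rfl
  | cons r rs' ih =>
    intro prev n hni hp hr
    have hrn : n ≤ r.length := hr r (by simp)
    have hlen : (sufMax (r.take n)).length = n := by
      rw [length_sufMax]; simp [hrn]
    have htake : (sufMax (r.take n) ++ r.drop n).take n = sufMax (r.take n) :=
      List.take_left' hlen
    have hdrop : (sufMax (r.take n) ++ r.drop n).drop n = r.drop n :=
      List.drop_left' hlen
    have harow : aRow (prev.take n) (r.take n)
        = List.zipWith (fun a b => max a b) (sufMax (r.take n)) (prev.take n) := by
      rw [aRow_eq_zipWith (r.take n) (prev.take n) hni (by simp only [List.length_take]; omega)]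
      exact List.zipWith_comm_of_comm (fun a b => max_comm a b)
    simp only [goAW, goBW, List.map_cons, htake, hdrop, harow]
    congr 1
    have hcl : (List.zipWith (fun a b => max a b) (sufMax (r.take n)) (prev.take n)
        ++ r.drop n).take n
        = List.zipWith (fun a b => max a b) (sufMax (r.take n)) (prev.take n) :=
      List.take_left' (by rw [List.length_zipWith, hlen]; simp only [List.length_take]; omega)
    apply ih
    · rw [hcl]
      exact nonInc_zipWith _ _ (nonInc_sufMax (r.take n))
        (by
          have : NonInc (prev.take n) := hni
          exact this)
    · rw [List.length_append, List.length_zipWith, hlen]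
      simp only [List.length_take, List.length_drop]
      omega
    · intro r' h'; exact hr r' (by simp [h'])

-- ===== VERDICT (by name: the statement is the Claim_ definition above) =====
theorem maxUpperRight_spec : Claim_equal_maxUpperRight := by
  intro grid _ hPre
  unfold Spec_maxUpperRight
  rw [A_bridge grid hPre, B_bridge grid hPre]
  cases grid with
  | nil => rfl
  | cons r rs =>
    show sufMax r :: goAW r.length (sufMax r) rs
      = sufMax r :: goBW r.length (sufMax r)
          (rs.map (fun row => sufMax (row.take r.length) ++ row.drop r.length))
    congr 1
    apply goAW_eq_goBW
    · rw [show (sufMax r).take r.length = sufMax r from by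
        rw [show r.length = (sufMax r).length from (length_sufMax r).symm]
        exact List.take_length]
      exact nonInc_sufMax r
    · rw [length_sufMax]
    · intro row hm
      have := hPre row (by simp [hm])
      simpa using this
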